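-- pv_equiv track=rewrite | github.com/FirepantsCZ/fcomp | fcomp.py | parenthesis_split
-- ===== SOURCE A (Python) =====
-- def parenthesis_split(test_str):
--     test_str=test_str.replace("(","*(")
--     test_str=test_str.replace(")",")*")
--     x=test_str.split("*")
--     res=[]
--     for i in x:
--         if i.startswith("(") and i.endswith(")"):
--             res.append(i[1:-1])
--         else:
--             if i != "":
--                 res.append(i)
--     return res
-- ===== SOURCE B (Python) =====
-- def parenthesis_split(test_str):
--     res = []
--     buf = []
--     def flush(buf):
--         if buf and buf[0] == "(" and buf[-1] == ")":
--             res.append("".join(buf[1:-1]))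
--         elif buf:
--             res.append("".join(buf))
--     for c in test_str:
--         if c == "(":
--             flush(buf)
--             buf = ["("]
--         elif c == ")":
--             buf.append(")")
--             flush(buf)
--             buf = []
--         elif c == "*":
--             flush(buf)
--             buf = []
--         else:
--             buf.append(c)
--     flush(buf)
--     return res
-- ===== Notes on version B (the rewrite author's own statement) =====
-- stated objective: alternative
-- what changed: B replaces A's four-pass pipeline (two marker-inserting replaces, a split on the marker, then a filtering loop) with a single linear scan that keeps a current-segment buffer and flushes it before an opening parenthesis, after a closing parenthesis, and at each asterisk.
import Mathlib
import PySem

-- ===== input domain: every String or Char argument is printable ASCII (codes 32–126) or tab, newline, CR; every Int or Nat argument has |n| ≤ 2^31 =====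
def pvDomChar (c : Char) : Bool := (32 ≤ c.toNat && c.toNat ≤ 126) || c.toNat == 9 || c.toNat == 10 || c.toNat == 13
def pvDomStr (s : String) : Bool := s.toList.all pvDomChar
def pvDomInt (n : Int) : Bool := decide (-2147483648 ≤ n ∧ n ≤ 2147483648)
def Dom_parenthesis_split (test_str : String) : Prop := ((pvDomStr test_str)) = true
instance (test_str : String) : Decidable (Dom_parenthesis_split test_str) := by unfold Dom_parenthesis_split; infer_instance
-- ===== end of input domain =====

-- B replaces A's replace/replace/split/filter pipeline with one linear scan flushing a segment buffer at '(' / ')' / '*'.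

-- ===== PORT A =====
-- test_str.split("*") is ported as PySem.Chars.splitOn on the char list (the sep "*" is nonempty, so split never raises)
def parenthesis_split (test_str : String) : List String :=
  let t1 := PySem.Str.replace test_str "(" "*("
  let t2 := PySem.Str.replace t1 ")" ")*"
  let x := PySem.Chars.splitOn t2.toList "*".toList
  x.foldl (fun res i =>
    if PySem.Chars.startswith i "(".toList && PySem.Chars.endswith i ")".toList then
      res ++ [String.ofList (PySem.Chars.slice i (some 1) (some (-1)))]
    else
      if i ≠ [] then res ++ [String.ofList i] else res) []

-- ===== PORT B =====
-- flush() of Source B (buf kept as a char list; ''.join of buf[1:-1] is String.ofList of the list slice)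
def psFlush (res : List String) (buf : List Char) : List String :=
  if !buf.isEmpty && (buf.head? == some '(') && (buf.getLast? == some ')') then
    res ++ [String.ofList (PySem.Chars.slice buf (some 1) (some (-1)))]
  else if !buf.isEmpty then res ++ [String.ofList buf] else res

def parenthesis_split_alt (test_str : String) : List String :=
  let st := test_str.toList.foldl (fun (st : List String × List Char) c =>
    if c = '(' then (psFlush st.1 st.2, ['('])
    else if c = ')' then (psFlush st.1 (st.2 ++ [')']), [])
    else if c = '*' then (psFlush st.1 st.2, [])
    else (st.1, st.2 ++ [c])) ([], [])
  psFlush st.1 st.2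

-- ===== PRECONDITION & SPEC =====
def Spec_parenthesis_split (test_str : String) (out : List String) : Prop := out = parenthesis_split_alt test_str
instance (test_str : String) (out : List String) : Decidable (Spec_parenthesis_split test_str out) := by unfold Spec_parenthesis_split; infer_instance

-- ===== CLAIM (what is proved, stated in full; the proofs are below) =====
def Claim_equal_parenthesis_split : Prop := ∀ (test_str : String), Dom_parenthesis_split test_str → Spec_parenthesis_split test_str (parenthesis_split test_str)

-- ===== LEMMAS AND PROOFS =====

-- what one loop iteration of A appends for a split piece
def pvG (i : List Char) : List String :=
  if PySem.Chars.startswith i "(".toList && PySem.Chars.endswith i ")".toList then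
    [String.ofList (PySem.Chars.slice i (some 1) (some (-1)))]
  else if i ≠ [] then [String.ofList i] else []

-- combined effect of A's two replaces on one character
def pvTc (c : Char) : List Char :=
  if c = '(' then ['*', '('] else if c = ')' then [')', '*'] else [c]

def pvConsHead (p : List Char) : List (List Char) → List (List Char)
  | [] => [p]
  | s :: r => (p ++ s) :: r

-- splitting a char list at every '*'
def pvSplitStar : List Char → List (List Char)
  | [] => [[]]
  | c :: t => if c = '*' then [] :: pvSplitStar t else pvConsHead [c] (pvSplitStar t)

-- B's loop step (definitionally the lambda in parenthesis_split_alt)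
def pvStep (st : List String × List Char) (c : Char) : List String × List Char :=
  if c = '(' then (psFlush st.1 st.2, ['('])
  else if c = ')' then (psFlush st.1 (st.2 ++ [')']), [])
  else if c = '*' then (psFlush st.1 st.2, [])
  else (st.1, st.2 ++ [c])

theorem replace_go_single (o : Char) (new : List Char) :
    ∀ (fuel : Nat) (l acc : List Char), l.length ≤ fuel →
      PySem.Chars.replace.go [o] new fuel l acc
        = acc.reverse ++ l.flatMap (fun c => if c = o then new else [c]) := by
  intro fuel
  induction fuel with
  | zero =>
    intro l acc h
    have : l = [] := List.eq_nil_of_length_eq_zero (Nat.le_zero.mp h)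
    subst this
    simp [PySem.Chars.replace.go]
  | succ n ih =>
    intro l acc h
    cases l with
    | nil => simp [PySem.Chars.replace.go]
    | cons c t =>
      rw [PySem.Chars.replace.go]
      by_cases hc : c = o
      · subst hc
        simp only [List.isPrefixOf, BEq.rfl, Bool.true_and, if_true]
        rw [ih _ _ (by simpa using Nat.le_of_succ_le_succ h)]
        simp
      · have : ([o].isPrefixOf (c :: t)) = false := by
          simp [List.isPrefixOf]
          exact fun hh => absurd hh.symm hc
        rw [this]
        simp only [Bool.false_eq_true, if_false]
        rw [ih _ _ (by simpa using Nat.le_of_succ_le_succ h)]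
        simp [hc]

theorem replace_single (o : Char) (new l : List Char) :
    PySem.Chars.replace l [o] new = l.flatMap (fun c => if c = o then new else [c]) := by
  rw [PySem.Chars.replace]
  simp only [List.isEmpty, Bool.false_eq_true, if_false]
  rw [replace_go_single o new l.length l [] (Nat.le_refl _)]
  simp

theorem transform_eq (l : List Char) :
    PySem.Chars.replace (PySem.Chars.replace l ['('] ['*', '(']) [')'] [')', '*']
      = l.flatMap pvTc := by
  rw [replace_single, replace_single]
  induction l with
  | nil => rfl
  | cons c t ih =>
    simp only [List.flatMap_cons, List.flatMap_append, ih, pvTc]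
    by_cases h1 : c = '('
    · subst h1; simp
    · by_cases h2 : c = ')'
      · subst h2; simp
      · simp [h1, h2]

theorem splitStar_ne_nil (l : List Char) : pvSplitStar l ≠ [] := by
  cases l with
  | nil => simp [pvSplitStar]
  | cons c t =>
    simp only [pvSplitStar]
    split
    · simp
    · cases h : pvSplitStar t <;> simp [pvConsHead]

theorem consHead_nil {L : List (List Char)} (h : L ≠ []) : pvConsHead [] L = L := by
  cases L with
  | nil => exact absurd rfl h
  | cons s r => simp [pvConsHead]

theorem consHead_consHead (p q : List Char) (L : List (List Char)) :
    pvConsHead p (pvConsHead q L) = pvConsHead (p ++ q) L := by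
  cases L <;> simp [pvConsHead]

theorem splitOn_go_star :
    ∀ (fuel : Nat) (l cur : List Char) (acc : List (List Char)), l.length ≤ fuel →
      PySem.Chars.splitOn.go ['*'] fuel l cur acc
        = acc.reverse ++ pvConsHead cur.reverse (pvSplitStar l) := by
  intro fuel
  induction fuel with
  | zero =>
    intro l cur acc h
    have : l = [] := List.eq_nil_of_length_eq_zero (Nat.le_zero.mp h)
    subst this
    simp [PySem.Chars.splitOn.go, pvSplitStar, pvConsHead]
  | succ n ih =>
    intro l cur acc h
    cases l with
    | nil => simp [PySem.Chars.splitOn.go, pvSplitStar, pvConsHead]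
    | cons c t =>
      rw [PySem.Chars.splitOn.go]
      by_cases hc : c = '*'
      · subst hc
        simp only [List.isPrefixOf, BEq.rfl, Bool.true_and, if_true]
        rw [ih _ _ _ (by simpa using Nat.le_of_succ_le_succ h)]
        simp only [List.length_cons, List.length_nil, List.drop_succ_cons, List.drop_zero,
          List.reverse_nil]
        rw [consHead_nil (splitStar_ne_nil t)]
        simp [pvSplitStar, pvConsHead]
      · have : (['*'].isPrefixOf (c :: t)) = false := by
          simp [List.isPrefixOf]
          exact fun hh => absurd hh.symm hc
        rw [this]
        simp only [Bool.false_eq_true, if_false]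
        rw [ih _ _ _ (by simpa using Nat.le_of_succ_le_succ h)]
        simp [pvSplitStar, hc, consHead_consHead]

theorem splitOn_star (l : List Char) :
    PySem.Chars.splitOn l ['*'] = pvSplitStar l := by
  rw [PySem.Chars.splitOn, splitOn_go_star _ _ _ _ (by omega)]
  simp [consHead_nil (splitStar_ne_nil l)]

theorem prefix_singleton (x : Char) (l : List Char) : [x] <+: l ↔ l.head? = some x := by
  cases l with
  | nil => simp
  | cons c t => simp [List.cons_prefix_cons, eq_comm]

theorem suffix_singleton (x : Char) (l : List Char) : [x] <:+ l ↔ l.getLast? = some x := by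
  rw [← List.reverse_prefix, List.reverse_singleton, prefix_singleton, List.head?_reverse]

-- Source B's head/last test agrees with A's startswith/endswith test
theorem cond_eq (buf : List Char) :
    (!List.isEmpty buf && (buf.head? == some '(') && (buf.getLast? == some ')'))
      = (PySem.Chars.startswith buf ['('] && PySem.Chars.endswith buf [')']) := by
  rw [Bool.eq_iff_iff]
  simp [PySem.Chars.startswith_iff, PySem.Chars.endswith_iff,
    prefix_singleton, suffix_singleton]
  intro h _
  cases buf <;> simp_all

theorem psFlush_g (res : List String) (buf : List Char) :
    psFlush res buf = res ++ pvG buf := by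
  unfold psFlush pvG
  rw [cond_eq, show ("(" : String).toList = ['('] from rfl,
    show (")" : String).toList = [')'] from rfl]
  split_ifs with h1 h2 h3 <;> simp_all

theorem foldlA (segs : List (List Char)) :
    ∀ (res : List String),
    segs.foldl (fun res i =>
      if PySem.Chars.startswith i "(".toList && PySem.Chars.endswith i ")".toList then
        res ++ [String.ofList (PySem.Chars.slice i (some 1) (some (-1)))]
      else
        if i ≠ [] then res ++ [String.ofList i] else res) res
      = res ++ segs.flatMap pvG := by
  induction segs with
  | nil => intro res; simp
  | cons i t ih =>
    intro res
    simp only [List.foldl_cons, List.flatMap_cons]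
    rw [ih]
    unfold pvG
    split_ifs <;> simp

theorem B_inv :
    ∀ (s : List Char) (res : List String) (buf : List Char),
      psFlush (s.foldl pvStep (res, buf)).1 (s.foldl pvStep (res, buf)).2
        = res ++ (pvConsHead buf (pvSplitStar (s.flatMap pvTc))).flatMap pvG := by
  intro s
  induction s with
  | nil =>
    intro res buf
    simp [pvSplitStar, pvConsHead, psFlush_g]
  | cons c t ih =>
    intro res buf
    simp only [List.foldl_cons, List.flatMap_cons]
    by_cases h1 : c = '('
    · subst h1
      rw [show pvStep (res, buf) '(' = (psFlush res buf, ['(']) from rfl, ih]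
      rw [show pvTc '(' = ['*', '('] from rfl]
      simp only [List.cons_append, List.nil_append]
      rw [show pvSplitStar ('*' :: '(' :: t.flatMap pvTc)
            = [] :: pvConsHead ['('] (pvSplitStar (t.flatMap pvTc)) from by simp [pvSplitStar]]
      rw [show pvConsHead buf ([] :: pvConsHead ['('] (pvSplitStar (t.flatMap pvTc)))
            = buf :: pvConsHead ['('] (pvSplitStar (t.flatMap pvTc)) from by simp [pvConsHead]]
      simp [psFlush_g]
    · by_cases h2 : c = ')'
      · subst h2
        rw [show pvStep (res, buf) ')' = (psFlush res (buf ++ [')']), []) from rfl, ih]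
        rw [show pvTc ')' = [')', '*'] from rfl]
        simp only [List.cons_append, List.nil_append]
        rw [show pvSplitStar (')' :: '*' :: t.flatMap pvTc)
              = pvConsHead [')'] ([] :: pvSplitStar (t.flatMap pvTc)) from by simp [pvSplitStar]]
        rw [show pvConsHead [')'] ([] :: pvSplitStar (t.flatMap pvTc))
              = [')'] :: pvSplitStar (t.flatMap pvTc) from by simp [pvConsHead]]
        rw [show pvConsHead buf ([')'] :: pvSplitStar (t.flatMap pvTc))
              = (buf ++ [')']) :: pvSplitStar (t.flatMap pvTc) from by simp [pvConsHead]]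
        rw [consHead_nil (splitStar_ne_nil _)]
        simp [psFlush_g]
      · by_cases h3 : c = '*'
        · subst h3
          rw [show pvStep (res, buf) '*' = (psFlush res buf, []) from rfl, ih]
          rw [show pvTc '*' = ['*'] from rfl]
          simp only [List.cons_append, List.nil_append]
          rw [show pvSplitStar ('*' :: t.flatMap pvTc)
                = [] :: pvSplitStar (t.flatMap pvTc) from by simp [pvSplitStar]]
          rw [show pvConsHead buf ([] :: pvSplitStar (t.flatMap pvTc))
                = buf :: pvSplitStar (t.flatMap pvTc) from by simp [pvConsHead]]
          rw [consHead_nil (splitStar_ne_nil _)]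
          simp [psFlush_g]
        · rw [show pvStep (res, buf) c = (res, buf ++ [c]) from by
              simp [pvStep, h1, h2, h3]]
          rw [ih]
          rw [show pvTc c = [c] from by simp [pvTc, h1, h2]]
          simp only [List.cons_append, List.nil_append]
          rw [show pvSplitStar (c :: t.flatMap pvTc)
                = pvConsHead [c] (pvSplitStar (t.flatMap pvTc)) from by simp [pvSplitStar, h3]]
          rw [consHead_consHead]

-- ===== VERDICT (by name: the statement is the Claim_ definition above) =====
theorem parenthesis_split_spec : Claim_equal_parenthesis_split := by
  intro test_str _
  unfold Spec_parenthesis_split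
  show parenthesis_split test_str = parenthesis_split_alt test_str
  rw [show parenthesis_split test_str
        = (PySem.Chars.splitOn
            (PySem.Str.replace (PySem.Str.replace test_str "(" "*(") ")" ")*").toList
            "*".toList).foldl (fun res i =>
              if PySem.Chars.startswith i "(".toList && PySem.Chars.endswith i ")".toList then
                res ++ [String.ofList (PySem.Chars.slice i (some 1) (some (-1)))]
              else
                if i ≠ [] then res ++ [String.ofList i] else res) [] from rfl]
  rw [show parenthesis_split_alt test_str
        = psFlush (test_str.toList.foldl pvStep ([], [])).1
            (test_str.toList.foldl pvStep ([], [])).2 from rfl]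
  rw [B_inv, foldlA]
  rw [PySem.Str.toList_replace, PySem.Str.toList_replace]
  rw [show ("(" : String).toList = ['('] from rfl, show ("*(" : String).toList = ['*', '('] from rfl,
      show (")" : String).toList = [')'] from rfl, show (")*" : String).toList = [')', '*'] from rfl,
      show ("*" : String).toList = ['*'] from rfl]
  rw [transform_eq, splitOn_star]
  rw [consHead_nil (splitStar_ne_nil _)]
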